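-- pv_equiv track=rewrite | github.com/C2J42/Piklopedle | pageParser.py | __lineParse__
-- ===== SOURCE A (Python) =====
-- def __lineParse__(str):
--     # begin after <a href=" (9) and title=" (7)
--     haveUrl = False
--     urlStr = ""
--     nameStr = ""
--
--     lastSeven = ""
--     isScanning = False
--     for i in range(7, len(str)): # begin at 7 to avoid index exceptions
--         # if isScanning, take data inputs
--         if isScanning:
--             if str[i] == "\"":
--                 isScanning = False
--                 if not haveUrl:
--                     haveUrl = True
--                 else: # just finished getting name
--                     break
--             else:
--                 if not haveUrl:
--                     urlStr = urlStr + str[i]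
--                 else: # has url, not name
--                     nameStr = nameStr + str[i]
--         # else, search for begin flags
--         else:
--             if str[i] == "\"":
--                 if str[i-7:i] == " title=" or str[i-7:i] == "a href=":
--                     isScanning = True
--     return nameStr + ", " + urlStr + "\n"
-- ===== SOURCE B (Python) =====
-- def __lineParse__(str):
--     # split on quotes; a quoted region opens iff the text right before the
--     # opening quote ends with one of the two 7-char flags
--     parts = str.split('"')
--     regions = []
--     i = 0
--     while i < len(parts) - 1 and len(regions) < 2:
--         if parts[i].endswith('a href=') or parts[i].endswith(' title='):
--             regions.append(parts[i + 1])
--             i += 2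
--         else:
--             i += 1
--     nameStr = regions[1] if len(regions) > 1 else ""
--     urlStr = regions[0] if regions else ""
--     return nameStr + ", " + urlStr + "\n"
-- ===== Notes on version B (the rewrite author's own statement) =====
-- stated objective: simpler
-- what changed: Replaces the char-by-char scanner with haveUrl/isScanning/lastSeven state by one split on the double-quote character followed by a walk over the parts list that collects the part after any part ending in a 7-char flag.
import Mathlib
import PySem

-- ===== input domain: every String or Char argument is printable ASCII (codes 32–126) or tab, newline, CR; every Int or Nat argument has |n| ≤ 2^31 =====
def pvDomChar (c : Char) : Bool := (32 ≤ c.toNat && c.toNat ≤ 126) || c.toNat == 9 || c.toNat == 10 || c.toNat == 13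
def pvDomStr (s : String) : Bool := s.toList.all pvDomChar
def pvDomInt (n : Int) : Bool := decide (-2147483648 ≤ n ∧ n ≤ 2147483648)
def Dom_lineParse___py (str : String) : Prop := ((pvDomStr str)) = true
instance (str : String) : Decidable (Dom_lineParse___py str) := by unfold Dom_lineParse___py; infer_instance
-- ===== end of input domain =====

-- B replaces A's char-by-char scanner state machine by one split on '"' plus a walk
-- over the parts list (simpler decomposition; same return value, no side effects).


-- ===== PORT A =====
-- A's `for i in range(7, len(str))` as the obvious structural recursion over the
-- chars from index 7, with the same state haveUrl/urlStr/nameStr/isScanning and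
-- the branches in the same order; the slice str[i-7:i] is carried as the sliding
-- 7-char window `win` (exact: at step i, win = str[i-7:i]); `break` = early return.
-- Python's variable `lastSeven` is assigned "" and never read, so it is not carried.
def lineParseLoop : List Char → List Char → Bool → List Char → List Char → Bool →
    List Char × List Char
  | [], _, _, urlStr, nameStr, _ => (urlStr, nameStr)
  | c :: rest, win, haveUrl, urlStr, nameStr, isScanning =>
    if isScanning then
      if c = '"' then
        if !haveUrl then
          lineParseLoop rest (win.drop 1 ++ [c]) true urlStr nameStr false
        else (urlStr, nameStr)  -- break: just finished getting name
      else
        if !haveUrl then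
          lineParseLoop rest (win.drop 1 ++ [c]) haveUrl (urlStr ++ [c]) nameStr isScanning
        else
          lineParseLoop rest (win.drop 1 ++ [c]) haveUrl urlStr (nameStr ++ [c]) isScanning
    else
      if c = '"' then
        if win = (" title=").toList ∨ win = ("a href=").toList then
          lineParseLoop rest (win.drop 1 ++ [c]) haveUrl urlStr nameStr true
        else
          lineParseLoop rest (win.drop 1 ++ [c]) haveUrl urlStr nameStr false
      else
        lineParseLoop rest (win.drop 1 ++ [c]) haveUrl urlStr nameStr false

def lineParse___py (str : String) : String :=
  let cs := str.toList
  let r := lineParseLoop (cs.drop 7) (cs.take 7) false [] [] false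
  -- return nameStr + ", " + urlStr + "\n"
  String.mk (r.2 ++ (", ").toList ++ r.1 ++ ['\n'])

-- ===== PORT B =====
-- parts[i].endswith('a href=') or parts[i].endswith(' title=')
def pvIsFlag (p : List Char) : Bool :=
  PySem.Chars.endswith p (("a href=").toList) || PySem.Chars.endswith p ((" title=").toList)

-- the while-loop over indices i of `parts`, as recursion on the suffix of parts at i
-- (i+1 < len(parts) = the suffix has two elements; k = len(regions) so far)
def pvWalk : List (List Char) → Nat → List (List Char)
  | p :: q :: rest, k =>
    if k < 2 then
      if pvIsFlag p then q :: pvWalk rest (k + 1) else pvWalk (q :: rest) k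
    else []
  | _, _ => []
termination_by ps _ => ps.length

def lineParse___py_alt (str : String) : String :=
  let parts := str.toList.splitOn '"'     -- str.split('"')
  let regions := pvWalk parts 0
  let nameStr := (regions[1]?).getD []    -- regions[1] if len(regions) > 1 else ""
  let urlStr := regions.headD []          -- regions[0] if regions else ""
  String.mk (nameStr ++ (", ").toList ++ urlStr ++ ['\n'])

-- ===== PRECONDITION & SPEC =====
def Spec_lineParse___py (str : String) (out : String) : Prop := out = lineParse___py_alt str
instance (str : String) (out : String) : Decidable (Spec_lineParse___py str out) := by
  unfold Spec_lineParse___py; infer_instance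

-- ===== CLAIM (what is proved, stated in full; the proofs are below) =====
def Claim_equal_lineParse___py : Prop :=
  ∀ (str : String), Dom_lineParse___py str → Spec_lineParse___py str (lineParse___py str)

-- ===== LEMMAS AND PROOFS =====

def pvSplit (l : List Char) : List (List Char) := l.splitOn '"'

-- window invariant: `hist` = chars since the last quote (or since the start),
-- `win` = the last seven chars of the whole prefix scanned so far
def pvWinInv (win hist : List Char) : Prop :=
  win.length = 7 ∧
    (win = hist.drop (hist.length - 7) ∨
      (hist.length < 7 ∧ ∃ pre, win = pre ++ '"' :: hist))

def pvSlide (win l : List Char) : List Char := l.foldl (fun w c => w.drop 1 ++ [c]) win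

def pvCombine (h : Bool) (url name : List Char) (regs : List (List Char)) :
    List Char × List Char :=
  if h then (url, name ++ regs.headD [])
  else (url ++ regs.headD [], name ++ (regs[1]?).getD [])

theorem pvSlide_append (win a b : List Char) :
    pvSlide win (a ++ b) = pvSlide (pvSlide win a) b := by
  simp [pvSlide, List.foldl_append]

theorem pvSlide_len (win l : List Char) (h : win.length = 7) :
    (pvSlide win l).length = 7 := by
  induction l generalizing win with
  | nil => exact h
  | cons c l ih =>
    simp only [pvSlide, List.foldl_cons] at *
    exact ih _ (by simp [List.length_drop, h])

theorem pvWinInv_step (win hist : List Char) (c : Char) (h : pvWinInv win hist) :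
    pvWinInv (win.drop 1 ++ [c]) (hist ++ [c]) := by
  obtain ⟨h7, hd | ⟨hlt, pre, hpre⟩⟩ := h
  · have hge : 7 ≤ hist.length := by
      by_contra hcon
      push_neg at hcon
      have hz : hist.length - 7 = 0 := by omega
      rw [hz, List.drop_zero] at hd
      subst hd; omega
    refine ⟨by simp [h7], Or.inl ?_⟩
    subst hd
    have hR : (hist ++ [c]).length - 7 = hist.length - 6 := by
      simp only [List.length_append, List.length_cons, List.length_nil]
      omega
    rw [hR, List.drop_append_of_le_length (show hist.length - 6 ≤ hist.length by omega),
      List.drop_drop]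
    have harith : hist.length - 7 + 1 = hist.length - 6 := by omega
    rw [harith]
  · subst hpre
    have h7' := h7
    simp at h7'
    cases pre with
    | nil =>
      refine ⟨by have := h7; simp at this ⊢; omega, Or.inl ?_⟩
      have hz : (hist ++ [c]).length - 7 = 0 := by simp at h7' ⊢; omega
      rw [hz, List.drop_zero]
      simp
    | cons p0 pre' =>
      refine ⟨by have := h7; simp at this ⊢; omega, Or.inr ⟨?_, pre', ?_⟩⟩
      · simp at h7' ⊢
        omega
      · simp [List.append_assoc]

theorem pvWinInv_quote (win : List Char) (h : win.length = 7) :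
    pvWinInv (win.drop 1 ++ ['"']) [] := by
  refine ⟨by simp [List.length_drop, h], Or.inr ⟨by norm_num, win.drop 1, by simp⟩⟩

theorem pvWinInv_iff (win hist F : List Char) (hF7 : F.length = 7) (hFq : '"' ∉ F)
    (h : pvWinInv win hist) : win = F ↔ F <:+ hist := by
  obtain ⟨h7, hd | ⟨hlt, pre, hpre⟩⟩ := h
  · have hge : 7 ≤ hist.length := by
      by_contra hcon
      push_neg at hcon
      have hz : hist.length - 7 = 0 := by omega
      rw [hz, List.drop_zero] at hd
      subst hd; omega
    constructor
    · rintro rfl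
      rw [hd]
      exact List.drop_suffix _ _
    · rintro ⟨t, rfl⟩
      have hlt' : (t ++ F).length - 7 = t.length := by
        simp [List.length_append, hF7]
      rw [hd, hlt', List.drop_left]
  · constructor
    · rintro rfl
      exact absurd (hpre ▸ (by simp : '"' ∈ pre ++ '"' :: hist)) hFq
    · intro hs
      exact absurd (hF7 ▸ hs.length_le) (by omega)

theorem pvScan_name (cs : List Char) (win url name : List Char) :
    lineParseLoop cs win true url name true =
      (url, name ++ cs.takeWhile (fun c => !(c = '"'))) := by
  induction cs generalizing win name with
  | nil => simp [lineParseLoop]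
  | cons c cs ih =>
    by_cases hc : c = '"'
    · subst hc
      simp [lineParseLoop, List.takeWhile_cons]
    · simp [lineParseLoop, hc, ih, List.takeWhile_cons]

theorem pvScan_url_nq (cs : List Char) (win url name : List Char) (h : '"' ∉ cs) :
    lineParseLoop cs win false url name true = (url ++ cs, name) := by
  induction cs generalizing win url with
  | nil => simp [lineParseLoop]
  | cons c cs ih =>
    have hc : c ≠ '"' := fun hcc => h (hcc ▸ List.mem_cons_self ..)
    have hm : '"' ∉ cs := fun hmm => h (List.mem_cons_of_mem _ hmm)
    simp [lineParseLoop, hc, ih _ _ hm]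

theorem pvScan_url (b cs win url name : List Char) (hb : '"' ∉ b) :
    lineParseLoop (b ++ '"' :: cs) win false url name true =
      lineParseLoop cs (pvSlide win (b ++ ['"'])) true (url ++ b) name false := by
  induction b generalizing win url with
  | nil => simp [lineParseLoop, pvSlide]
  | cons c b ih =>
    have hc : c ≠ '"' := fun hcc => hb (hcc ▸ List.mem_cons_self ..)
    have hm : '"' ∉ b := fun hmm => hb (List.mem_cons_of_mem _ hmm)
    simp only [List.cons_append, lineParseLoop, if_true, hc, if_false, Bool.not_true,
      Bool.false_eq_true, if_neg hc]
    rw [ih _ _ hm]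
    simp [pvSlide, List.append_assoc]

theorem pvSplit_nil : pvSplit [] = [[]] := rfl

theorem pvSplit_cons_quote (l : List Char) : pvSplit ('"' :: l) = [] :: pvSplit l := by
  simp [pvSplit, List.splitOn, List.splitOnP_cons]

theorem pvSplit_cons_other (c : Char) (l : List Char) (h : c ≠ '"') :
    pvSplit (c :: l) = (pvSplit l).modifyHead (c :: ·) := by
  simp [pvSplit, List.splitOn, List.splitOnP_cons, h]

theorem pvSplit_ne_nil (l : List Char) : pvSplit l ≠ [] := List.splitOnP_ne_nil _ l

theorem pvModifyHead_append {α : Type} (f : α → α) (X Y : List α) (h : X ≠ []) :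
    (X ++ Y).modifyHead f = X.modifyHead f ++ Y := by
  cases X with
  | nil => exact absurd rfl h
  | cons x xs => rfl

theorem pvSplit_free (h0 l : List Char) (h : '"' ∉ h0) :
    pvSplit (h0 ++ l) = (pvSplit l).modifyHead (h0 ++ ·) := by
  induction h0 with
  | nil =>
    simp only [List.nil_append]
    rcases hsp : pvSplit l with _ | ⟨x, xs⟩ <;> simp [List.modifyHead]
  | cons c h0 ih =>
    have hc : c ≠ '"' := fun hcc => h (hcc ▸ List.mem_cons_self ..)
    have hm : '"' ∉ h0 := fun hmm => h (List.mem_cons_of_mem _ hmm)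
    rw [List.cons_append, pvSplit_cons_other c _ hc, ih hm, List.modifyHead_modifyHead]
    congr 1

theorem pvSplit_first (b l : List Char) (hb : '"' ∉ b) :
    pvSplit (b ++ '"' :: l) = b :: pvSplit l := by
  rw [pvSplit_free b _ hb, pvSplit_cons_quote]
  simp

theorem pvSplit_q (x y : List Char) : pvSplit (x ++ '"' :: y) = pvSplit x ++ pvSplit y := by
  induction x with
  | nil => rw [List.nil_append, pvSplit_cons_quote, pvSplit_nil]; rfl
  | cons c x ih =>
    by_cases hc : c = '"'
    · subst hc
      rw [List.cons_append, pvSplit_cons_quote, pvSplit_cons_quote, ih, List.cons_append]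
    · rw [List.cons_append, pvSplit_cons_other c _ hc, pvSplit_cons_other c _ hc, ih,
        pvModifyHead_append _ _ _ (pvSplit_ne_nil x)]

theorem pvSplit_nq (l : List Char) (h : '"' ∉ l) : pvSplit l = [l] := by
  induction l with
  | nil => rfl
  | cons c l ih =>
    have hc : c ≠ '"' := fun hcc => h (hcc ▸ List.mem_cons_self ..)
    have hm : '"' ∉ l := fun hmm => h (List.mem_cons_of_mem _ hmm)
    rw [pvSplit_cons_other c _ hc, ih hm]
    rfl

theorem pvSplit_head (l : List Char) :
    (pvSplit l).head? = some (l.takeWhile (fun c => !(c = '"'))) := by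
  induction l with
  | nil => rfl
  | cons c l ih =>
    by_cases hc : c = '"'
    · subst hc
      rw [pvSplit_cons_quote]
      simp [List.takeWhile_cons]
    · obtain ⟨x, xs, hx⟩ := List.exists_cons_of_ne_nil (pvSplit_ne_nil l)
      rw [pvSplit_cons_other c _ hc, hx]
      rw [hx] at ih
      simp at ih
      simp [List.takeWhile_cons, hc, ih]

theorem pvPart_len (l q : List Char) (h : q ∈ pvSplit l) : q.length ≤ l.length := by
  induction l generalizing q with
  | nil =>
    rw [pvSplit_nil] at h
    simp at h
    simp [h]
  | cons c l ih =>
    by_cases hc : c = '"'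
    · subst hc
      rw [pvSplit_cons_quote] at h
      rcases List.mem_cons.mp h with rfl | hm
      · simp
      · exact (ih q hm).trans (by simp)
    · obtain ⟨x, xs, hx⟩ := List.exists_cons_of_ne_nil (pvSplit_ne_nil l)
      rw [pvSplit_cons_other c _ hc, hx] at h
      rcases List.mem_cons.mp h with rfl | hm
      · have := ih x (hx ▸ List.mem_cons_self ..)
        simpa using this
      · exact (ih q (hx ▸ List.mem_cons_of_mem _ hm)).trans (by simp)

theorem pvFlag_len (p : List Char) (h : pvIsFlag p = true) : 7 ≤ p.length := by
  unfold pvIsFlag at h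
  rw [Bool.or_eq_true] at h
  rcases h with hf | hf
  · have := (PySem.Chars.endswith_iff _ _).mp hf
    simpa using this.length_le
  · have := (PySem.Chars.endswith_iff _ _).mp hf
    simpa using this.length_le

theorem pvWalk_big (ps : List (List Char)) (k : Nat) (h : 2 ≤ k) : pvWalk ps k = [] := by
  match ps with
  | [] => simp [pvWalk]
  | [x] => simp [pvWalk]
  | p :: q :: rest => simp [pvWalk, Nat.not_lt.mpr h]

theorem pvWalk_skip (qs rest : List (List Char)) (k : Nat)
    (hs : ∀ q ∈ qs, q.length < 7) (hr : rest ≠ []) :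
    pvWalk (qs ++ rest) k = pvWalk rest k := by
  induction qs generalizing k with
  | nil => rfl
  | cons q qs ih =>
    obtain ⟨y, ys, hy⟩ := List.exists_cons_of_ne_nil
      (List.append_ne_nil_of_right_ne_nil qs hr)
    have hfl : pvIsFlag q = false := by
      cases hfq : pvIsFlag q
      · rfl
      · exact absurd (pvFlag_len q hfq)
          (by have := hs q (List.mem_cons_self ..); omega)
    by_cases hk : k < 2
    · rw [List.cons_append, hy]
      simp only [pvWalk, if_pos hk, hfl, Bool.false_eq_true, if_false]
      rw [← hy]
      exact ih k (fun p hp => hs p (List.mem_cons_of_mem _ hp))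
    · rw [pvWalk_big _ _ (by omega), pvWalk_big _ _ (by omega)]

theorem pvWalk_small (ps : List (List Char)) (k : Nat) (hs : ∀ q ∈ ps, q.length < 7) :
    pvWalk ps k = [] := by
  cases hps : ps with
  | nil => simp [pvWalk]
  | cons p ps' =>
    have hne : ps ≠ [] := by simp [hps]
    rw [← hps, ← List.dropLast_append_getLast hne,
      pvWalk_skip _ _ _ (fun q hq => hs q ((List.dropLast_sublist ps).subset hq)) (by simp)]
    simp [pvWalk]

theorem pvLastq (l : List Char) (h : '"' ∈ l) :
    ∃ a b, l = a ++ '"' :: b ∧ '"' ∉ b := by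
  induction l with
  | nil => simp at h
  | cons x l ih =>
    by_cases hx : '"' ∈ l
    · obtain ⟨a, b, rfl, hb⟩ := ih hx
      exact ⟨x :: a, b, rfl, hb⟩
    · rcases List.mem_cons.mp h with rfl | hm
      · exact ⟨[], l, rfl, hx⟩
      · exact absurd hm hx

theorem pvFirstq (l : List Char) (h : '"' ∈ l) :
    ∃ a b, l = a ++ '"' :: b ∧ '"' ∉ a := by
  induction l with
  | nil => simp at h
  | cons x l ih =>
    by_cases hx : x = '"'
    · exact ⟨[], l, by simp [hx], by simp⟩
    · rcases List.mem_cons.mp h with hq | hm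
      · exact absurd hq.symm hx
      · obtain ⟨a, b, rfl, ha⟩ := ih hm
        refine ⟨x :: a, b, rfl, ?_⟩
        intro hmem
        rcases List.mem_cons.mp hmem with h1 | h2
        · exact hx h1.symm
        · exact ha h2

theorem pvMain (n : Nat) : ∀ (cs win hist : List Char) (h : Bool) (url name : List Char),
    cs.length ≤ n → pvWinInv win hist →
    lineParseLoop cs win h url name false =
      pvCombine h url name
        (pvWalk ((pvSplit cs).modifyHead (hist ++ ·)) (if h then 1 else 0)) := by
  have hid : ∀ X : List (List Char), X.modifyHead (([] : List Char) ++ ·) = X := by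
    intro X
    rcases X with _ | ⟨x, xs⟩ <;> simp [List.modifyHead]
  induction n with
  | zero =>
    intro cs win hist h url name hlen hinv
    have hcs : cs = [] := List.eq_nil_of_length_eq_zero (by omega)
    subst hcs
    cases h <;> simp [lineParseLoop, pvSplit_nil, pvWalk, pvCombine, List.modifyHead]
  | succ n ih =>
    intro cs win hist h url name hlen hinv
    cases cs with
    | nil =>
      cases h <;> simp [lineParseLoop, pvSplit_nil, pvWalk, pvCombine, List.modifyHead]
    | cons c cs' =>
      simp only [List.length_cons] at hlen
      have hk2 : (if h then 1 else 0) < 2 := by cases h <;> simp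
      by_cases hc : c = '"'
      · subst hc
        obtain ⟨q, rest, hqr⟩ := List.exists_cons_of_ne_nil (pvSplit_ne_nil cs')
        have hparts : (pvSplit ('"' :: cs')).modifyHead (hist ++ ·) = hist :: q :: rest := by
          rw [pvSplit_cons_quote, hqr]
          simp [List.modifyHead]
        have hiff1 := pvWinInv_iff win hist ((" title=").toList) (by decide) (by decide) hinv
        have hiff2 := pvWinInv_iff win hist (("a href=").toList) (by decide) (by decide) hinv
        by_cases hflag : win = (" title=").toList ∨ win = ("a href=").toList
        · -- the quote opens a region
          have hfl : pvIsFlag hist = true := by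
            unfold pvIsFlag
            rw [Bool.or_eq_true]
            rcases hflag with hf | hf
            · exact Or.inr ((PySem.Chars.endswith_iff _ _).mpr (hiff1.mp hf))
            · exact Or.inl ((PySem.Chars.endswith_iff _ _).mpr (hiff2.mp hf))
          have hflag' := hflag
          simp at hflag'
          have hA : lineParseLoop ('"' :: cs') win h url name false =
              lineParseLoop cs' (win.drop 1 ++ ['"']) h url name true := by
            simp [lineParseLoop, hflag']
          cases h with
          | true =>
            have hq : q = cs'.takeWhile (fun c => !(c = '"')) := by
              have hh := pvSplit_head cs'
              rw [hqr] at hh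
              simpa using hh
            rw [hA, pvScan_name, hparts]
            simp [pvWalk, hfl, pvWalk_big rest 2 le_rfl, pvCombine, hq]
          | false =>
            by_cases hqm : '"' ∈ cs'
            · obtain ⟨b, cs'', rfl, hb⟩ := pvFirstq cs' hqm
              have hlen7 : (win.drop 1 ++ ['"']).length = 7 := by simp [hinv.1]
              have hinv2 : pvWinInv (pvSlide (win.drop 1 ++ ['"']) (b ++ ['"'])) [] := by
                have hsl : pvSlide (win.drop 1 ++ ['"']) (b ++ ['"']) =
                    (pvSlide (win.drop 1 ++ ['"']) b).drop 1 ++ ['"'] := by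
                  rw [pvSlide_append]
                  rfl
                rw [hsl]
                exact pvWinInv_quote _ (pvSlide_len _ _ hlen7)
              have hlen2 : cs''.length ≤ n := by
                simp [List.length_append] at hlen
                omega
              have hih := ih cs'' _ [] true (url ++ b) name hlen2 hinv2
              rw [hid] at hih
              have hparts2 : (pvSplit ('"' :: (b ++ '"' :: cs''))).modifyHead (hist ++ ·) =
                  hist :: b :: pvSplit cs'' := by
                rw [pvSplit_cons_quote, pvSplit_first b cs'' hb]
                simp [List.modifyHead]
              rw [hA, pvScan_url b cs'' _ url name hb, hih, hparts2]
              simp only [pvWalk, hfl, if_true]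
              norm_num
              cases hW : pvWalk (pvSplit cs'') 1 <;> simp [pvCombine, hW]
            · have hsp : pvSplit cs' = [cs'] := pvSplit_nq cs' hqm
              have hparts2 : (pvSplit ('"' :: cs')).modifyHead (hist ++ ·) = [hist, cs'] := by
                rw [pvSplit_cons_quote, hsp]
                simp [List.modifyHead]
              rw [hA, pvScan_url_nq _ _ _ _ hqm, hparts2]
              simp [pvWalk, hfl, pvCombine]
        · -- the quote does not open a region
          push_neg at hflag
          obtain ⟨hf1, hf2⟩ := hflag
          have hflag : win ≠ (" title=").toList ∧ win ≠ ("a href=").toList := ⟨hf1, hf2⟩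
          simp at hf1 hf2
          have e2 : PySem.Chars.endswith hist (("a href=").toList) = false := by
            rw [Bool.eq_false_iff]
            intro hs
            exact hflag.2 (hiff2.mpr ((PySem.Chars.endswith_iff _ _).mp hs))
          have e1 : PySem.Chars.endswith hist ((" title=").toList) = false := by
            rw [Bool.eq_false_iff]
            intro hs
            exact hflag.1 (hiff1.mpr ((PySem.Chars.endswith_iff _ _).mp hs))
          have hfl : pvIsFlag hist = false := by
            unfold pvIsFlag
            rw [e1, e2]
            rfl
          have hA : lineParseLoop ('"' :: cs') win h url name false =
              lineParseLoop cs' (win.drop 1 ++ ['"']) h url name false := by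
            simp [lineParseLoop, hf1, hf2]
          have hih := ih cs' (win.drop 1 ++ ['"']) [] h url name (by omega)
            (pvWinInv_quote win hinv.1)
          rw [hid] at hih
          rw [hA, hih, hparts, hqr]
          simp [pvWalk, hfl, hk2]
      · -- an ordinary character
        have hA : lineParseLoop (c :: cs') win h url name false =
            lineParseLoop cs' (win.drop 1 ++ [c]) h url name false := by
          simp [lineParseLoop, hc]
        have hih := ih cs' (win.drop 1 ++ [c]) (hist ++ [c]) h url name (by omega)
          (pvWinInv_step win hist c hinv)
        rw [hA, hih, pvSplit_cons_other c cs' hc, List.modifyHead_modifyHead]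
        have hcomp : ((hist ++ ·) ∘ (c :: ·)) = (fun x => (hist ++ [c]) ++ x) := by
          funext x
          simp
        rw [hcomp]

theorem pvTop (s : List Char) :
    lineParseLoop (s.drop 7) (s.take 7) false [] [] false =
      pvCombine false [] [] (pvWalk (pvSplit s) 0) := by
  by_cases hlen : s.length < 7
  · have hdrop : s.drop 7 = [] := List.drop_eq_nil_of_le (by omega)
    have hwalk : pvWalk (pvSplit s) 0 = [] :=
      pvWalk_small _ _ (fun q hq => lt_of_le_of_lt (pvPart_len s q hq) hlen)
    rw [hdrop, hwalk]
    simp [lineParseLoop, pvCombine]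
  · push_neg at hlen
    have hs : s.take 7 ++ s.drop 7 = s := List.take_append_drop 7 s
    have h7 : (s.take 7).length = 7 := by rw [List.length_take]; omega
    by_cases hq : '"' ∈ s.take 7
    · obtain ⟨u, v, huv, hv⟩ := pvLastq _ hq
      have hvlen : u.length + (v.length + 1) = 7 := by
        have := congrArg List.length huv
        simp at this
        omega
      have hinv : pvWinInv (s.take 7) v :=
        ⟨h7, Or.inr ⟨by omega, u, huv⟩⟩
      rw [pvMain (s.drop 7).length (s.drop 7) (s.take 7) v false [] [] le_rfl hinv]
      have hsplit : pvSplit s = pvSplit u ++ (pvSplit (s.drop 7)).modifyHead (v ++ ·) := by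
        conv_lhs => rw [← hs, huv]
        rw [List.append_assoc, List.cons_append, pvSplit_q, pvSplit_free v _ hv]
      rw [hsplit, pvWalk_skip (pvSplit u) ((pvSplit (s.drop 7)).modifyHead (v ++ ·)) 0
        (fun p hp => by
          have h1 : p.length ≤ u.length := pvPart_len u p hp
          omega)
        (by
          rcases hx : pvSplit (s.drop 7) with _ | ⟨y, ys⟩
          · exact absurd hx (pvSplit_ne_nil _)
          · simp [hx, List.modifyHead])]
      simp
    · have hinv : pvWinInv (s.take 7) (s.take 7) :=
        ⟨h7, Or.inl (by rw [h7]; simp)⟩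
      rw [pvMain (s.drop 7).length (s.drop 7) (s.take 7) (s.take 7) false [] [] le_rfl hinv]
      have hsplit : pvSplit s = (pvSplit (s.drop 7)).modifyHead (s.take 7 ++ ·) := by
        conv_lhs => rw [← hs]
        exact pvSplit_free _ _ hq
      rw [hsplit]
      simp

-- ===== VERDICT (by name: the statement is the Claim_ definition above) =====
theorem lineParse___py_spec : Claim_equal_lineParse___py := by
  intro s _
  unfold Spec_lineParse___py lineParse___py lineParse___py_alt
  have h := pvTop s.toList
  simp only [pvCombine, if_neg (by simp : ¬(false = true)), List.nil_append] at h
  simp only [h, pvSplit]
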